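-- pv_equiv track=rewrite | github.com/noobonzv/Assignments | 自然语言处理/词语预测/CODE/ngram.py | get_related_words
-- ===== SOURCE A (Python) =====
-- N = 3
--
-- def get_related_words(pre_cut, suf_cut):
--     """
--     取出 [MASK]附近的几个词
--     :param pre_cut: list，原句子mask前的部分分词结果
--     :param suf_cut: list，原句子mask后的部分分词结果
--     :return: [MASK]附近的几个词，[w1,w2,MASK,w3,w4]
--     """
--     related_word = []
--     if len(pre_cut) > N - 1:
--         for j in range(N - 2, -1, -1):
--             related_word.append(pre_cut[-1 - j])
--     else:
--         related_word += pre_cut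
--     related_word.append('MASK')
--     if len(suf_cut) > N - 1:
--         for j in range(N - 1):
--             related_word.append(suf_cut[j])
--     else:
--         related_word += suf_cut
--     return related_word
-- ===== SOURCE B (Python) =====
-- N = 3
--
-- def get_related_words(pre_cut, suf_cut):
--     return pre_cut[-(N - 1):] + ['MASK'] + suf_cut[:N - 1]
-- ===== Notes on version B (the rewrite author's own statement) =====
-- stated objective: simpler
-- what changed: Replaces the two guarded index-loops/extends with a single branch-free closed-form expression built from slices: pre_cut[-(N-1):] + ['MASK'] + suf_cut[:N-1].
import Mathlib
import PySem

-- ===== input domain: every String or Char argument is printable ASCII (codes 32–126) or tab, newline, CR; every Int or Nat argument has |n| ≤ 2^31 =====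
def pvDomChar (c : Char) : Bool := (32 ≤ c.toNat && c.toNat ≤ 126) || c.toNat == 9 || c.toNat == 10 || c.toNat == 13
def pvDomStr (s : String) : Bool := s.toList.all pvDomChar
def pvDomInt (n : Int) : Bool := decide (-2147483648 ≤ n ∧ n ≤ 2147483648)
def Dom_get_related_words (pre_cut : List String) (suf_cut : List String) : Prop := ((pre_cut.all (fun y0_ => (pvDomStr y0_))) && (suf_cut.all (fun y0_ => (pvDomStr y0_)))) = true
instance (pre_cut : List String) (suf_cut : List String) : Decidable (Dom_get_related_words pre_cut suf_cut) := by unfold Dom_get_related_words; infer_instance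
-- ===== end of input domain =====

-- ===== PORT A =====
-- One-line objective: B replaces A's guarded index loops by a branch-free slice concatenation.
-- Port of A (N = 3): literal transliteration; loop indices are in range under the guards, so .getD "" is never taken.
def get_related_words (pre_cut : List String) (suf_cut : List String) : List String :=
  let related_word : List String := []
  let related_word :=
    if pre_cut.length > 3 - 1 then
      (PySem.List.pyRange (3 - 2) (-1) (-1)).foldl
        (fun acc j => acc ++ [(PySem.List.pyGet? pre_cut (-1 - j)).getD ""]) related_word
    else
      related_word ++ pre_cut
  let related_word := related_word ++ ["MASK"]
  let related_word :=
    if suf_cut.length > 3 - 1 then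
      (PySem.List.pyRange 0 (3 - 1) 1).foldl
        (fun acc j => acc ++ [(PySem.List.pyGet? suf_cut j).getD ""]) related_word
    else
      related_word ++ suf_cut
  related_word

-- ===== PORT B =====
def get_related_words_alt (pre_cut : List String) (suf_cut : List String) : List String :=
  PySem.List.slice pre_cut (some (-(3 - 1 : Int))) none
    ++ ["MASK"]
    ++ PySem.List.slice suf_cut none (some (3 - 1 : Int))

-- ===== PRECONDITION & SPEC =====
def Spec_get_related_words (pre_cut : List String) (suf_cut : List String) (out : List String) : Prop := out = get_related_words_alt pre_cut suf_cut
instance (pre_cut : List String) (suf_cut : List String) (out : List String) : Decidable (Spec_get_related_words pre_cut suf_cut out) := by unfold Spec_get_related_words; infer_instance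

-- ===== CLAIM (what is proved, stated in full; the proofs are below) =====
def Claim_equal_get_related_words : Prop := ∀ (pre_cut : List String) (suf_cut : List String), Dom_get_related_words pre_cut suf_cut → Spec_get_related_words pre_cut suf_cut (get_related_words pre_cut suf_cut)

-- ===== LEMMAS AND PROOFS =====

-- A's pre-loop (with initial accumulator []) produces the last two elements when length > 2,
-- and the `else` branch produces the whole list; both equal drop (length - 2) (Nat subtraction).
theorem pre_loop_eq_drop (xs : List String) :
    (if xs.length > 3 - 1 then
      (PySem.List.pyRange (3 - 2) (-1) (-1)).foldl
        (fun acc j => acc ++ [(PySem.List.pyGet? xs (-1 - j)).getD ""]) ([] : List String)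
    else ([] : List String) ++ xs) = xs.drop (xs.length - 2) := by
  split_ifs with h
  · have h2 : xs.length - 2 < xs.length := by omega
    have h1 : xs.length - 1 < xs.length := by omega
    have r : PySem.List.pyRange (3 - 2) (-1) (-1) = [1, 0] := by decide
    rw [r]
    have g2 : PySem.List.pyGet? xs (-1 - 1) = xs[xs.length - 2]? := by
      have := PySem.List.pyGet?_neg_ofNat xs 2 (by omega) (by omega)
      simpa using this
    have g1 : PySem.List.pyGet? xs (-1 - 0) = xs[xs.length - 1]? := by
      have := PySem.List.pyGet?_neg_ofNat xs 1 (by omega) (by omega)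
      simpa using this
    simp only [List.foldl, g2, g1, List.getElem?_eq_getElem h2, List.getElem?_eq_getElem h1,
      Option.getD_some, List.nil_append]
    have hd2 : xs.drop (xs.length - 2) = xs[xs.length - 2] :: xs.drop (xs.length - 2 + 1) :=
      List.drop_eq_getElem_cons h2
    have hd1 : xs.drop (xs.length - 1) = xs[xs.length - 1] :: xs.drop (xs.length - 1 + 1) :=
      List.drop_eq_getElem_cons h1
    have : xs.length - 2 + 1 = xs.length - 1 := by omega
    have hlast : xs.length - 1 + 1 = xs.length := by omega
    rw [hd2, this, hd1, hlast, List.drop_length]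
    simp
  · have : xs.length - 2 = 0 := by omega
    simp [this]

-- A's suf-loop appends the first two elements when length > 2, else the whole list;
-- both equal acc ++ take 2.
theorem suf_loop_eq_take (xs : List String) (acc : List String) :
    (if xs.length > 3 - 1 then
      (PySem.List.pyRange 0 (3 - 1) 1).foldl
        (fun acc j => acc ++ [(PySem.List.pyGet? xs j).getD ""]) acc
    else acc ++ xs) = acc ++ xs.take 2 := by
  split_ifs with h
  · have r : PySem.List.pyRange 0 (3 - 1) 1 = [0, 1] := by decide
    rw [r]
    obtain ⟨a, b, c, rest, rfl⟩ : ∃ a b c rest, xs = a :: b :: c :: rest := by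
      match xs, h with
      | a :: b :: c :: rest, _ => exact ⟨a, b, c, rest, rfl⟩
    simp only [List.foldl]
    rw [PySem.List.pyGet?_zero_cons,
        show (1 : Int) = ((0 : Nat) : Int) + 1 from by norm_num,
        PySem.List.pyGet?_cons_succ]
    simp [PySem.List.pyGet?_zero_cons]
  · rw [List.take_of_length_le (by omega)]

-- ===== VERDICT (by name: the statement is the Claim_ definition above) =====
theorem get_related_words_spec : Claim_equal_get_related_words := by
  intro pre_cut suf_cut _
  unfold Spec_get_related_words get_related_words get_related_words_alt
  simp only [pre_loop_eq_drop pre_cut, suf_loop_eq_take suf_cut]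
  rw [show (-(3 - 1 : Int)) = (-(2 : Int)) from by norm_num,
      show ((3 - 1 : Int)) = ((2 : Nat) : Int) from by norm_num,
      PySem.List.slice_from_neg_ofNat pre_cut 2 (by omega),
      PySem.List.slice_to_natCast]
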